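-- pv_equiv track=rewrite | github.com/MemorySlice/MemDiver | architect/pattern_generator.py | find_anchors
-- ===== SOURCE A (Python) =====
-- from typing import List, Optional, Tuple
--
-- def find_anchors(
--     static_mask: List[bool],
--     min_anchor_length: int = 4,
-- ) -> List[Tuple[int, int]]:
--     """Find contiguous runs of static bytes that can serve as anchors.
--
--     Args:
--         static_mask: Per-byte static flags.
--         min_anchor_length: Minimum consecutive static bytes for an anchor.
--
--     Returns:
--         List of (start_offset, length) tuples for anchor regions.
--     """
--     anchors = []
--     start = None
--     for i, is_static in enumerate(static_mask):
--         if is_static: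
--             if start is None:
--                 start = i
--         else:
--             if start is not None and (i - start) >= min_anchor_length:
--                 anchors.append((start, i - start))
--             start = None
--     if start is not None and (len(static_mask) - start) >= min_anchor_length:
--         anchors.append((start, len(static_mask) - start))
--     return anchors
-- ===== SOURCE B (Python) =====
-- from typing import List, Tuple
--
--
-- def find_anchors(
--     static_mask: List[bool],
--     min_anchor_length: int = 4,
-- ) -> List[Tuple[int, int]]:
--     """Boundary detection: find run starts and run ends independently by
--     comparing each byte with its neighbour, pair them up with zip, and keep
--     the pairs that are long enough."""
--     n = len(static_mask)
--     starts = [i for i in range(n)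
--               if static_mask[i] and (i == 0 or not static_mask[i - 1])]
--     ends = [i + 1 for i in range(n)
--             if static_mask[i] and (i == n - 1 or not static_mask[i + 1])]
--     return [(s, e - s) for s, e in zip(starts, ends)
--             if e - s >= min_anchor_length]
-- ===== Notes on version B (the rewrite author's own statement) =====
-- stated objective: alternative
-- what changed: Instead of A's single stateful scan with a start/None sentinel and a post-loop flush, B detects run boundaries declaratively: it builds the list of run-start indices and the list of run-end indices by neighbour comparison in two independent index passes, pairs them with zip, and filters the pairs by length.
import Mathlib
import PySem

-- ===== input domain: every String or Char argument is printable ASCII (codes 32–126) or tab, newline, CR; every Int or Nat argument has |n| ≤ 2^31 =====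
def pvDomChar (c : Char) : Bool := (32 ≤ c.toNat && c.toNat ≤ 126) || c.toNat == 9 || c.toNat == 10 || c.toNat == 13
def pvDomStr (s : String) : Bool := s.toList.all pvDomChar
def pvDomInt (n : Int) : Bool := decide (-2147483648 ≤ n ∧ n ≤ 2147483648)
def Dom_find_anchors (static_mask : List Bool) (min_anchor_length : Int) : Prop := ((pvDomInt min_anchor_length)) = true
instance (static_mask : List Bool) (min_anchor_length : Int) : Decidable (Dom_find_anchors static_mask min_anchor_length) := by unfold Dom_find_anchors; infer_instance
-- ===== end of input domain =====

-- B replaces A's start/None sentinel scan with boundary detection: run-start and run-end indices are computed in two independent index passes and paired with zip (alternative decomposition; same O(n) cost).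


-- ===== PORT A =====
-- the for-loop of A, transcribed as structural recursion over the same state (anchors, start) with the running index i
def pvALoop (min_anchor_length : Int) :
    List Bool → Int → List (Int × Int) → Option Int → List (Int × Int) × Option Int
  | [], _, anchors, start => (anchors, start)
  | is_static :: rest, i, anchors, start =>
    if is_static = true then
      match start with
      | none => pvALoop min_anchor_length rest (i + 1) anchors (some i)
      | some _ => pvALoop min_anchor_length rest (i + 1) anchors start
    else
      match start with
      | some s =>
        if min_anchor_length ≤ i - s then
          pvALoop min_anchor_length rest (i + 1) (anchors ++ [(s, i - s)]) none
        else
          pvALoop min_anchor_length rest (i + 1) anchors none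
      | none => pvALoop min_anchor_length rest (i + 1) anchors none

def find_anchors (static_mask : List Bool) (min_anchor_length : Int) : List (Int × Int) :=
  let r := pvALoop min_anchor_length static_mask 0 [] none
  match r.2 with
  | some s =>
    if min_anchor_length ≤ (static_mask.length : Int) - s then
      r.1 ++ [(s, (static_mask.length : Int) - s)]
    else r.1
  | none => r.1

-- ===== PORT B =====
-- Source B's two list comprehensions over range(n); indices are kept as Nat (range(n) yields 0..n-1)
-- and static_mask[i] is ported as List.getD — exact here because every accessed index is in range
-- (the `i == 0` / `i == n-1` disjuncts guard the neighbour accesses exactly as in Python).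
def pvStarts (static_mask : List Bool) : List Nat :=
  (List.range static_mask.length).filter
    (fun i => static_mask.getD i false && (i == 0 || !(static_mask.getD (i - 1) false)))

def pvEnds (static_mask : List Bool) : List Nat :=
  ((List.range static_mask.length).filter
    (fun i => static_mask.getD i false && (i == static_mask.length - 1 || !(static_mask.getD (i + 1) false)))).map (· + 1)

-- the final comprehension: zip start/end lists, filter by length, build (s, e - s)
def find_anchors_alt (static_mask : List Bool) (min_anchor_length : Int) : List (Int × Int) :=
  (((pvStarts static_mask).zip (pvEnds static_mask)).filter
      (fun p => min_anchor_length ≤ (p.2 : Int) - (p.1 : Int))).map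
    (fun p => ((p.1 : Int), (p.2 : Int) - (p.1 : Int)))

-- ===== PRECONDITION & SPEC =====
def Spec_find_anchors (static_mask : List Bool) (min_anchor_length : Int) (out : List (Int × Int)) : Prop := out = find_anchors_alt static_mask min_anchor_length
instance (static_mask : List Bool) (min_anchor_length : Int) (out : List (Int × Int)) : Decidable (Spec_find_anchors static_mask min_anchor_length out) := by unfold Spec_find_anchors; infer_instance

-- ===== CLAIM (what is proved, stated in full; the proofs are below) =====
def Claim_equal_find_anchors : Prop := ∀ (static_mask : List Bool) (min_anchor_length : Int), Dom_find_anchors static_mask min_anchor_length → Spec_find_anchors static_mask min_anchor_length (find_anchors static_mask min_anchor_length)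

-- ===== LEMMAS AND PROOFS =====

-- Proof-only middle model: a recursion over maximal runs (one step per run, offset carried).
-- A's flushed loop and B's zip of boundary lists are each proved equal to it.
def pvGo (min_anchor_length : Int) : List Bool → Int → List (Int × Int)
  | [], _ => []
  | b :: rest, offset =>
    let grp := rest.takeWhile (· == b)
    let len : Int := 1 + grp.length
    if b = true ∧ min_anchor_length ≤ len then
      (offset, len) :: pvGo min_anchor_length (rest.dropWhile (· == b)) (offset + len)
    else
      pvGo min_anchor_length (rest.dropWhile (· == b)) (offset + len)
  termination_by l => l.length
  decreasing_by
    all_goals simpa using Nat.lt_succ_of_le (rest.length_dropWhile_le (· == b))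

-- A's post-loop flush, as a function of the loop result and the end index
def pvFlush (m : Int) (r : List (Int × Int) × Option Int) (e : Int) : List (Int × Int) :=
  match r.2 with
  | some s => if m ≤ e - s then r.1 ++ [(s, e - s)] else r.1
  | none => r.1

theorem takeWhile_rep_false (k : ℕ) (rest : List Bool) :
    (List.replicate k true ++ false :: rest).takeWhile (· == true) = List.replicate k true := by
  induction k with
  | zero => simp [List.takeWhile]
  | succ n ih => simpa [List.replicate_succ] using ih

theorem dropWhile_rep_false (k : ℕ) (rest : List Bool) :
    (List.replicate k true ++ false :: rest).dropWhile (· == true) = false :: rest := by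
  induction k with
  | zero => simp [List.dropWhile]
  | succ n ih => simpa [List.replicate_succ] using ih

theorem go_false (m : Int) (rest : List Bool) (off : Int) :
    pvGo m (false :: rest) off = pvGo m rest (off + 1) := by
  cases rest with
  | nil => simp [pvGo]
  | cons c r =>
    cases c with
    | true => simp [pvGo]
    | false =>
      rw [pvGo, pvGo]
      simp only [List.takeWhile, List.dropWhile]
      norm_num
      ring_nf

-- main invariant for the A side: from a `none` state A's flushed loop appends exactly pvGo (P),
-- and from a `some s` state after n ≥ 1 trues it appends pvGo on the reconstituted run (Q)
theorem pv_main (m : Int) :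
    ∀ N mask, List.length mask ≤ N →
      ((∀ (off : Int) (anchors : List (Int × Int)),
          pvFlush m (pvALoop m mask off anchors none) (off + mask.length) =
            anchors ++ pvGo m mask off) ∧
       (∀ (s : Int) (n : ℕ), 1 ≤ n → ∀ (anchors : List (Int × Int)),
          pvFlush m (pvALoop m mask (s + n) anchors (some s)) (s + n + mask.length) =
            anchors ++ pvGo m (List.replicate n true ++ mask) s)) := by
  intro N
  induction N with
  | zero =>
    intro mask hlen
    have hm : mask = [] := List.eq_nil_of_length_eq_zero (Nat.le_zero.mp hlen)
    subst hm
    constructor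
    · intro off anchors; simp [pvALoop, pvFlush, pvGo]
    · intro s n hn anchors
      cases n with
      | zero => omega
      | succ k =>
        simp only [pvALoop, pvFlush, List.length_nil, Nat.cast_zero, add_zero]
        rw [List.replicate_succ, pvGo.eq_def]
        have ht : (List.replicate k true).takeWhile (· == true) = List.replicate k true := by
          simp
        have hd : (List.replicate k true).dropWhile (· == true) = ([] : List Bool) := by
          simp
        simp only [ht, hd]
        have h1 : s + ((k + 1 : ℕ) : Int) - s = 1 + (k : Int) := by push_cast; ring
        rw [h1]
        by_cases hc : m ≤ 1 + (k : Int)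
        · simp [hc, pvGo]
        · simp [hc, pvGo]
  | succ N ih =>
    intro mask hlen
    cases mask with
    | nil => exact ih [] (by simp)
    | cons b rest =>
      have hrest : rest.length ≤ N := by simpa using hlen
      constructor
      · -- P
        intro off anchors
        cases b with
        | false =>
          rw [pvALoop]
          rw [if_neg (by decide : ¬ (false = true))]
          have := (ih rest hrest).1 (off + 1) anchors
          rw [go_false]
          rw [show off + ((false :: rest).length : Int) = off + 1 + rest.length by
            push_cast [List.length_cons]; ring]
          exact this
        | true =>
          rw [pvALoop, if_pos rfl]
          have := (ih rest hrest).2 off 1 (le_refl 1) anchors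
          simp only [Nat.cast_one, List.replicate_one] at this
          rw [show off + ((true :: rest).length : Int) = off + 1 + rest.length by
            push_cast [List.length_cons]; ring]
          simpa using this
      · -- Q
        intro s n hn anchors
        cases b with
        | true =>
          rw [pvALoop, if_pos rfl]
          have := (ih rest hrest).2 s (n + 1) (by omega) anchors
          have harg : s + (n : Int) + 1 = s + ((n + 1 : ℕ) : Int) := by push_cast; ring
          have hend : s + (n : Int) + ((true :: rest).length : Int)
              = s + ((n + 1 : ℕ) : Int) + rest.length := by
            push_cast [List.length_cons]; ring
          rw [harg, hend, this]
          congr 1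
          rw [List.replicate_succ' (n := n)]
          simp
        | false =>
          rw [pvALoop]
          rw [if_neg (by decide : ¬ (false = true))]
          have hss : s + (n : Int) - s = (n : Int) := by ring
          cases n with
          | zero => omega
          | succ k =>
            have hrepl : List.replicate (k + 1) true ++ false :: rest
                = true :: (List.replicate k true ++ false :: rest) := by
              simp [List.replicate_succ]
            rw [hrepl, pvGo.eq_def]
            simp only [takeWhile_rep_false, dropWhile_rep_false, List.length_replicate]
            have hlen1 : (1 : Int) + (k : Int) = ((k + 1 : ℕ) : Int) := by push_cast; ring
            rw [hlen1, go_false]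
            have hP := (ih rest hrest).1 (s + ((k + 1 : ℕ) : Int) + 1)
            have hend : s + ((k + 1 : ℕ) : Int) + ((false :: rest).length : Int)
                = s + ((k + 1 : ℕ) : Int) + 1 + rest.length := by
              push_cast [List.length_cons]; ring
            rw [hss]
            by_cases hc : m ≤ ((k + 1 : ℕ) : Int)
            · simp only [if_pos hc]
              rw [hend, hP (anchors ++ [(s, ((k + 1 : ℕ) : Int))])]
              simp [hc]
              all_goals (push_cast at hc ⊢; omega)
            · simp only [if_neg hc]
              rw [hend, hP anchors]
              simp [hc]
              all_goals (push_cast at hc ⊢; omega)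

-- ===== B side: recursive characterisations of the boundary lists =====

-- run-start indices, with the value preceding the list carried as `prev`
def pvSP : Bool → List Bool → List Nat
  | _, [] => []
  | prev, b :: rest =>
    if b && !prev then 0 :: (pvSP b rest).map (· + 1) else (pvSP b rest).map (· + 1)

-- run-end indices (already +1, i.e. exclusive ends)
def pvEP : List Bool → List Nat
  | [] => []
  | b :: rest =>
    if b && !(rest.getD 0 false) then 1 :: (pvEP rest).map (· + 1) else (pvEP rest).map (· + 1)

theorem pvS_gen : ∀ (mask : List Bool) (prev : Bool),
    (List.range mask.length).filter
      (fun i => mask.getD i false && !((prev :: mask).getD i false)) = pvSP prev mask := by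
  intro mask
  induction mask with
  | nil => intro prev; simp [pvSP]
  | cons b rest ih =>
    intro prev
    rw [List.length_cons, List.range_succ_eq_map, pvSP]
    simp only [List.filter_cons, List.filter_map]
    rw [show (fun i => (b :: rest).getD i false && !((prev :: b :: rest).getD i false)) ∘ Nat.succ
        = fun i => rest.getD i false && !((b :: rest).getD i false) from by
      funext i; simp [Function.comp, List.getD_cons_succ]]
    rw [ih b]
    by_cases hb : (b && !prev) = true
    · simp [hb]
    · simp [hb]

theorem pvStarts_eq (mask : List Bool) : pvStarts mask = pvSP false mask := by
  rw [← pvS_gen mask false]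
  unfold pvStarts
  apply List.filter_congr
  intro i _
  cases i with
  | zero => simp
  | succ j => simp [List.getD_cons_succ]

theorem pvE_gen : ∀ (mask : List Bool),
    ((List.range mask.length).filter
      (fun i => mask.getD i false && !(mask.getD (i + 1) false))).map (· + 1) = pvEP mask := by
  intro mask
  induction mask with
  | nil => simp [pvEP]
  | cons b rest ih =>
    rw [List.length_cons, List.range_succ_eq_map, pvEP]
    simp only [List.filter_cons, List.filter_map]
    rw [show (fun i => (b :: rest).getD i false && !((b :: rest).getD (i + 1) false)) ∘ Nat.succ
        = fun i => rest.getD i false && !(rest.getD (i + 1) false) from by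
      funext i; simp [Function.comp, List.getD_cons_succ]]
    simp only [List.getD_cons_zero, List.getD_cons_succ,
      show (Nat.succ : Nat → Nat) = (· + 1) from funext fun n => rfl]
    by_cases hb : (b && !(rest.getD 0 false)) = true
    · simp only [hb, if_true, List.map_cons, List.map_map]
      rw [show ((· + 1) ∘ (· + 1) : Nat → Nat) = (· + 1) ∘ (· + 1) from rfl]
      rw [← List.map_map, ih]
    · simp only [hb, if_false, Bool.false_eq_true, List.map_map]
      rw [← List.map_map, ih]

theorem pvEnds_eq (mask : List Bool) : pvEnds mask = pvEP mask := by
  rw [← pvE_gen mask]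
  unfold pvEnds
  congr 1
  apply List.filter_congr
  intro i hi
  have hi' : i < mask.length := List.mem_range.mp hi
  by_cases h : i = mask.length - 1
  · have h1 : (i == mask.length - 1) = true := by simp [h]
    have h2 : mask.getD (i + 1) false = false := List.getD_eq_default _ _ (by omega)
    rw [h1, h2]
    simp
  · have h1 : (i == mask.length - 1) = false := by simp [h]
    rw [h1]
    simp

-- `prev = true` is irrelevant when the list does not start with true
theorem pvSP_head_false (d : List Bool) (hd : d.headD false = false) :
    pvSP true d = pvSP false d := by
  cases d with
  | nil => rfl
  | cons c d' =>
    simp at hd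
    subst hd
    simp [pvSP]

theorem pvSP_true_run : ∀ (j : ℕ) (d : List Bool), d.headD false = false →
    pvSP true (List.replicate j true ++ d) = (pvSP false d).map (· + j) := by
  intro j
  induction j with
  | zero => intro d hd; simp [pvSP_head_false d hd]
  | succ k ih =>
    intro d hd
    rw [List.replicate_succ, List.cons_append, pvSP]
    rw [if_neg (by simp)]
    rw [ih d hd, List.map_map]
    rw [show ((fun x => x + 1) ∘ (fun x : ℕ => x + k)) = (fun x : ℕ => x + (k + 1)) from by
      funext x; show x + k + 1 = x + (k + 1); omega]

theorem pvSP_run (k : ℕ) (d : List Bool) (hd : d.headD false = false) :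
    pvSP false (List.replicate (k + 1) true ++ d)
      = 0 :: (pvSP false d).map (· + (k + 1)) := by
  rw [List.replicate_succ, List.cons_append, pvSP]
  rw [if_pos (by simp)]
  rw [pvSP_true_run k d hd, List.map_map]
  rw [show ((fun x => x + 1) ∘ (fun x : ℕ => x + k)) = (fun x : ℕ => x + (k + 1)) from by
    funext x; show x + k + 1 = x + (k + 1); omega]

theorem pvEP_run : ∀ (k : ℕ) (d : List Bool), d.headD false = false →
    pvEP (List.replicate (k + 1) true ++ d)
      = (k + 1) :: (pvEP d).map (· + (k + 1)) := by
  intro k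
  induction k with
  | zero =>
    intro d hd
    rw [List.replicate_one, List.cons_append, List.nil_append, pvEP]
    have hthis : d.getD 0 false = false := by
      cases d with
      | nil => rfl
      | cons c d' => simpa using hd
    rw [if_pos (by rw [hthis]; simp)]
  | succ j ih =>
    intro d hd
    rw [List.replicate_succ, List.cons_append, pvEP]
    rw [if_neg (by simp [List.replicate_succ])]
    rw [ih d hd, List.map_cons, List.map_map]
    rw [show ((fun x => x + 1) ∘ (fun x : ℕ => x + (j + 1))) = (fun x : ℕ => x + (j + 1 + 1)) from by
      funext x; show x + (j + 1) + 1 = x + (j + 1 + 1); omega]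

theorem headD_dropWhile_false : ∀ (l : List Bool), (l.dropWhile (· == true)).headD false = false := by
  intro l
  induction l with
  | nil => rfl
  | cons b r ih =>
    cases b with
    | true => exact ih
    | false => rfl

-- shifting both boundary lists by c shifts the offset of the produced anchors
theorem pv_shift (m off : Int) (c : ℕ) (S : List Nat) : ∀ (E : List Nat),
    ((((S.map (· + c)).zip (E.map (· + c))).filter
        (fun p => m ≤ (p.2 : Int) - (p.1 : Int))).map
      (fun p => (off + (p.1 : Int), (p.2 : Int) - (p.1 : Int))))
    = (((S.zip E).filter (fun p => m ≤ (p.2 : Int) - (p.1 : Int))).map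
      (fun p => (off + c + (p.1 : Int), (p.2 : Int) - (p.1 : Int)))) := by
  induction S with
  | nil => intro E; simp
  | cons a S ih =>
    intro E
    cases E with
    | nil => simp
    | cons e E =>
      simp only [List.map_cons, List.zip_cons_cons, List.filter_cons]
      by_cases hc : m ≤ (e : Int) - (a : Int)
      · rw [if_pos (by simp only [decide_eq_true_eq]; push_cast; push_cast at hc; omega)]
        rw [if_pos (by simpa using hc)]
        rw [List.map_cons, List.map_cons, ih E]
        congr 1
        simp only [Prod.mk.injEq]
        refine ⟨by push_cast; ring, by push_cast; ring⟩
      · rw [if_neg (by simp only [decide_eq_true_eq]; push_cast; push_cast at hc; omega)]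
        rw [if_neg (by simpa using hc)]
        exact ih E

theorem pv_b_main (m : Int) :
    ∀ N mask, List.length mask ≤ N → ∀ off : Int,
      pvGo m mask off
        = (((pvSP false mask).zip (pvEP mask)).filter
            (fun p => m ≤ (p.2 : Int) - (p.1 : Int))).map
          (fun p => (off + (p.1 : Int), (p.2 : Int) - (p.1 : Int))) := by
  intro N
  induction N with
  | zero =>
    intro mask hlen off
    have hm : mask = [] := List.eq_nil_of_length_eq_zero (Nat.le_zero.mp hlen)
    subst hm
    simp [pvGo, pvSP, pvEP]
  | succ N ih =>
    intro mask hlen off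
    cases mask with
    | nil => simp [pvGo, pvSP, pvEP]
    | cons b rest =>
      have hrest : rest.length ≤ N := by simpa using hlen
      cases b with
      | false =>
        rw [go_false, ih rest hrest (off + 1)]
        rw [show pvSP false (false :: rest) = (pvSP false rest).map (· + 1) from by
          simp [pvSP]]
        rw [show pvEP (false :: rest) = (pvEP rest).map (· + 1) from by
          simp [pvEP]]
        rw [pv_shift m off 1 (pvSP false rest) (pvEP rest)]
        norm_num
      | true =>
        -- decompose the leading run of trues
        obtain ⟨k, d, hdec, hdhead⟩ :
            ∃ k d, rest = List.replicate k true ++ d ∧ d.headD false = false := by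
          refine ⟨(rest.takeWhile (· == true)).length, rest.dropWhile (· == true), ?_, ?_⟩
          · conv_lhs => rw [← List.takeWhile_append_dropWhile (p := (· == true)) (l := rest)]
            congr 1
            apply List.eq_replicate_of_mem
            intro x hx
            simpa using List.mem_takeWhile_imp hx
          · exact headD_dropWhile_false rest
        subst hdec
        have hmask : true :: (List.replicate k true ++ d) = List.replicate (k + 1) true ++ d := by
          rw [List.replicate_succ, List.cons_append]
        have hdlen : d.length ≤ N := by
          have := hrest
          simp at this
          omega
        have htk : (List.replicate k true ++ d).takeWhile (· == true) = List.replicate k true := by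
          cases d with
          | nil => simp
          | cons c d' =>
            have hc : c = false := by simpa using hdhead
            subst hc
            exact takeWhile_rep_false k d'
        have hdk : (List.replicate k true ++ d).dropWhile (· == true) = d := by
          cases d with
          | nil => simp
          | cons c d' =>
            have hc : c = false := by simpa using hdhead
            subst hc
            exact dropWhile_rep_false k d'
        rw [pvGo.eq_def]
        simp only [htk, hdk, List.length_replicate]
        rw [hmask, pvSP_run k d hdhead, pvEP_run k d hdhead, List.zip_cons_cons,
          List.filter_cons]
        by_cases hc : m ≤ (1 : Int) + (k : Int)
        · rw [if_pos ⟨trivial, hc⟩]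
          rw [if_pos (by simp only [decide_eq_true_eq]; push_cast; omega)]
          rw [List.map_cons, ih d hdlen (off + (1 + (k : Int))), pv_shift]
          congr 1
          · simp only [Prod.mk.injEq]
            refine ⟨by push_cast; ring, by push_cast; ring⟩
          · apply List.map_congr_left
            intro p _
            simp only [Prod.mk.injEq]
            refine ⟨by push_cast; ring, trivial⟩
        · rw [if_neg (fun h => hc h.2)]
          rw [if_neg (by simp only [decide_eq_true_eq]; push_cast; omega)]
          rw [ih d hdlen (off + (1 + (k : Int))), pv_shift]
          apply List.map_congr_left
          intro p _
          simp only [Prod.mk.injEq]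
          refine ⟨by push_cast; ring, trivial⟩

-- ===== VERDICT (by name: the statement is the Claim_ definition above) =====
theorem find_anchors_spec : Claim_equal_find_anchors := by
  intro mask m _hd
  unfold Spec_find_anchors find_anchors find_anchors_alt
  have hA := (pv_main m mask.length mask (le_refl _)).1 0 []
  simp only [List.nil_append, zero_add] at hA
  have hB := pv_b_main m mask.length mask (le_refl _) 0
  rw [pvStarts_eq, pvEnds_eq]
  rw [show pvFlush m (pvALoop m mask 0 [] none) ((mask.length : Int))
      = (match (pvALoop m mask 0 [] none).2 with
        | some s => if m ≤ (mask.length : Int) - s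
            then (pvALoop m mask 0 [] none).1 ++ [(s, (mask.length : Int) - s)]
            else (pvALoop m mask 0 [] none).1
        | none => (pvALoop m mask 0 [] none).1) from rfl] at hA
  rw [hA, hB]
  simp
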